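-- pv_equiv track=rewrite | github.com/r-marcus/2048 | Final_2048.py | smushL
-- ===== SOURCE A (Python) =====
-- def smushL(masterList): #Move all non 0 values to the left of the 2D list
--     for col in range(len(masterList[0])):
--         nextFilled = 0
--         for row in range(len(masterList)):
--             if masterList[row][col] != 0:
--                 masterList[nextFilled][col] = masterList[row][col]
--                 if row != nextFilled and row != 0:
--                     masterList[row][col] = 0
--                 nextFilled += 1
--     return masterList
-- ===== SOURCE B (Python) =====
-- def smushL(masterList):  # gather each column's non-zeros, then overwrite the column top-down (in-place cell writes)
--     for col in range(len(masterList[0])):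
--         vals = [row[col] for row in masterList if row[col] != 0]
--         for r in range(len(masterList)):
--             masterList[r][col] = vals[r] if r < len(vals) else 0
--     return masterList
-- ===== Notes on version B (the rewrite author's own statement) =====
-- stated objective: simpler
-- what changed: Replaces A's single stateful compaction pass (nextFilled pointer with conditional move-and-zero writes) by a gather-then-fill decomposition: collect the column's non-zero values, then rewrite every cell of the column top-down; same in-place cell mutation, no pointer bookkeeping.
import Mathlib
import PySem

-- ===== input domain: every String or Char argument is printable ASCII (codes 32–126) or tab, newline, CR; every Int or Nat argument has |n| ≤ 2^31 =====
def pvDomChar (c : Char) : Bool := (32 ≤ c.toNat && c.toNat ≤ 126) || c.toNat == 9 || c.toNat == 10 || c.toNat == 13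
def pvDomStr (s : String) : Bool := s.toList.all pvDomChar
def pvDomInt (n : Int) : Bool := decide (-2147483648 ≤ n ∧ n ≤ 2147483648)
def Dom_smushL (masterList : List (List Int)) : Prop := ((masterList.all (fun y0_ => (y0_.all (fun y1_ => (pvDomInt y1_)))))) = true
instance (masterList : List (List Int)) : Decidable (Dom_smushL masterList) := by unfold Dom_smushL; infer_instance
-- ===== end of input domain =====

-- B replaces A's stateful nextFilled compaction by a gather-then-fill pass per column (simpler decomposition, same cost).
-- Both Pythons mutate masterList in place identically (cell-by-cell writes); the equivalence proved here is about the return value.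


-- ===== PORT A =====
-- loop body of A's inner `for row in range(len(masterList))`; state = (masterList, nextFilled).
-- Indices produced by range are natural numbers, so indexing uses Nat getD/set; within Pre_ every
-- access is in range, so the getD defaults are never the result.
def smushAInner (col : Nat) (st : List (List Int) × Nat) (row : Nat) : List (List Int) × Nat :=
  let m := st.1
  let nf := st.2
  if (m.getD row []).getD col 0 ≠ 0 then
    let m1 := m.set nf ((m.getD nf []).set col ((m.getD row []).getD col 0))
    let m2 := if row ≠ nf ∧ row ≠ 0 then m1.set row ((m1.getD row []).set col 0) else m1
    (m2, nf + 1)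
  else (m, nf)

def smushL (masterList : List (List Int)) : List (List Int) :=
  (List.range (masterList.headD []).length).foldl
    (fun m col => ((List.range m.length).foldl (smushAInner col) (m, 0)).1) masterList

-- ===== PORT B =====
-- loop body of B's inner `for r in range(len(masterList))`: masterList[r][col] = vals[r] if r < len(vals) else 0
def smushBInner (col : Nat) (vals : List Int) (m : List (List Int)) (r : Nat) : List (List Int) :=
  m.set r ((m.getD r []).set col (if r < vals.length then vals.getD r 0 else 0))

def smushL_alt (masterList : List (List Int)) : List (List Int) :=
  (List.range (masterList.headD []).length).foldl
    (fun m col =>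
      let vals := m.filterMap (fun row => if row.getD col 0 ≠ 0 then some (row.getD col 0) else none)
      (List.range m.length).foldl (smushBInner col vals) m) masterList

-- ===== PRECONDITION & SPEC =====
-- Pre_ excludes exactly the inputs where Python A raises IndexError: the empty list
-- (masterList[0]) and ragged inputs with some row shorter than row 0 (masterList[row][col]).
def Pre_smushL (masterList : List (List Int)) : Prop :=
  masterList ≠ [] ∧ ∀ row ∈ masterList, (masterList.headD []).length ≤ row.length
instance (masterList : List (List Int)) : Decidable (Pre_smushL masterList) := by
  unfold Pre_smushL; infer_instance

def pvWitness_smushL : List (List Int) := [[0, 2], [4, 0], [2, 2]]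

def Spec_smushL (masterList : List (List Int)) (out : List (List Int)) : Prop := out = smushL_alt masterList
instance (masterList : List (List Int)) (out : List (List Int)) : Decidable (Spec_smushL masterList out) := by unfold Spec_smushL; infer_instance

-- ===== CLAIM (what is proved, stated in full; the proofs are below) =====
def Claim_equal_smushL : Prop := ∀ (masterList : List (List Int)), Dom_smushL masterList → Pre_smushL masterList → Spec_smushL masterList (smushL masterList)

-- ===== LEMMAS AND PROOFS =====

-- column value of m at row i (0 outside range; only used in-range under the hypotheses below)
def colv (m : List (List Int)) (col i : Nat) : Int := (m.getD i []).getD col 0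

-- the non-zero values among the first k entries of column col
def vsc (m : List (List Int)) (col k : Nat) : List Int :=
  ((List.range k).map (colv m col)).filter (fun v => v ≠ 0)

-- value of column col, row i, after A has processed rows 0..k-1
def tAf (m : List (List Int)) (col k i : Nat) : Int :=
  if i < (vsc m col k).length then (vsc m col k).getD i 0
  else if i < k then 0 else colv m col i

theorem vsc_len_le (m : List (List Int)) (col k : Nat) : (vsc m col k).length ≤ k := by
  calc (vsc m col k).length ≤ ((List.range k).map (colv m col)).length := List.length_filter_le _ _
    _ = k := by simp

theorem vsc_succ (m : List (List Int)) (col k : Nat) :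
    vsc m col (k+1) = vsc m col k ++ (if colv m col k ≠ 0 then [colv m col k] else []) := by
  unfold vsc
  rw [List.range_succ, List.map_append, List.filter_append]
  by_cases h : colv m col k = 0 <;> simp [h]

theorem mapIdx_congr' {α β : Type} (m : List α) (f g : Nat → α → β)
    (h : ∀ i (hi : i < m.length), f i m[i] = g i m[i]) : m.mapIdx f = m.mapIdx g := by
  apply List.ext_getElem (by simp)
  intro i h1 h2
  simp only [List.getElem_mapIdx]
  exact h i (by simpa using h1)

theorem mapIdx_set_self (m : List (List Int)) (col : Nat)
    (hc : ∀ row ∈ m, col < row.length) :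
    m.mapIdx (fun i row => row.set col (colv m col i)) = m := by
  apply List.ext_getElem (by simp)
  intro i h1 h2
  simp only [List.getElem_mapIdx]
  have hci : col < m[i].length := hc _ (List.getElem_mem h2)
  have hcv : colv m col i = m[i][col] := by
    unfold colv
    rw [List.getD_eq_getElem _ _ h2, List.getD_eq_getElem _ _ hci]
  rw [hcv, List.set_getElem_self]

theorem getD_mapIdx {α : Type} (m : List α) (f : Nat → α → α) (j : Nat) (hj : j < m.length) (d : α) :
    (m.mapIdx f).getD j d = f j m[j] := by
  rw [List.getD_eq_getElem _ _ (by simpa using hj)]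
  simp

theorem set_mapIdx {α : Type} (m : List α) (f : Nat → α → α) (j : Nat) (v : α) :
    (m.mapIdx f).set j v = m.mapIdx (fun i row => if i = j then v else f i row) := by
  apply List.ext_getElem (by simp)
  intro i h1 h2
  rw [List.getElem_set]
  simp only [List.getElem_mapIdx]
  split
  · simp_all
  · rw [if_neg (by omega)]

theorem getD_append_left (l l' : List Int) (i : Nat) (h : i < l.length) :
    (l ++ l').getD i 0 = l.getD i 0 := by
  rw [List.getD_eq_getElem _ _ (by simp; omega), List.getD_eq_getElem _ _ h,
    List.getElem_append_left h]

theorem getD_append_len (l : List Int) (w : Int) : (l ++ [w]).getD l.length 0 = w := by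
  rw [List.getD_eq_getElem _ _ (by simp)]
  simp

-- A's inner loop over rows 0..k-1: state = (column rewritten per tAf, number of non-zeros so far)
theorem innerA (m : List (List Int)) (col : Nat) (hc : ∀ row ∈ m, col < row.length) :
    ∀ k, k ≤ m.length →
      (List.range k).foldl (smushAInner col) (m, 0)
        = (m.mapIdx (fun i row => row.set col (tAf m col k i)), (vsc m col k).length) := by
  intro k
  induction k with
  | zero =>
    intro _
    have ht : ∀ i, tAf m col 0 i = colv m col i := by
      intro i
      simp [tAf, vsc]
    simp only [List.range_zero, List.foldl_nil, ht, mapIdx_set_self m col hc]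
    rfl
  | succ k ih =>
    intro hk1
    have hk : k < m.length := by omega
    rw [List.range_succ, List.foldl_append, ih (by omega)]
    have hck : col < m[k].length := hc _ (List.getElem_mem hk)
    have hread : ((m.mapIdx (fun i row => row.set col (tAf m col k i))).getD k []).getD col 0
        = colv m col k := by
      rw [getD_mapIdx _ _ _ hk]
      have hL := vsc_len_le m col k
      have htk : tAf m col k k = colv m col k := by
        unfold tAf
        rw [if_neg (show ¬ k < (vsc m col k).length by omega),
          if_neg (show ¬ k < k by omega)]
      rw [htk, List.getD_eq_getElem _ _ (by simpa using hck)]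
      simp
    simp only [List.foldl_cons, List.foldl_nil, smushAInner, hread]
    have hL : (vsc m col k).length ≤ k := vsc_len_le m col k
    by_cases hv : colv m col k ≠ 0
    · rw [if_pos hv]
      have hvs : vsc m col (k+1) = vsc m col k ++ [colv m col k] := by
        rw [vsc_succ, if_pos hv]
      have hlen1 : (vsc m col (k+1)).length = (vsc m col k).length + 1 := by
        rw [hvs]
        simp
      have hgetL : (m.mapIdx (fun i row => row.set col (tAf m col k i))).getD (vsc m col k).length []
          = (m[(vsc m col k).length]'(by omega)).set col (tAf m col k (vsc m col k).length) :=
        getD_mapIdx _ _ _ (by omega) _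
      have htL : tAf m col (k+1) (vsc m col k).length = colv m col k := by
        unfold tAf
        rw [if_pos (show (vsc m col k).length < (vsc m col (k+1)).length by omega), hvs,
          getD_append_len]
      by_cases hLe : (vsc m col k).length = k
      · -- value already in place: A overwrites row k with itself, no zeroing
        have hg : ¬ (k ≠ (vsc m col k).length ∧ k ≠ 0) := by omega
        rw [hgetL, if_neg hg, set_mapIdx, Prod.mk.injEq]
        refine ⟨?_, hlen1.symm⟩
        apply mapIdx_congr'
        intro i hi
        by_cases hiL : i = (vsc m col k).length
        · subst hiL
          rw [if_pos rfl, List.set_set, htL]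
        · rw [if_neg hiL]
          congr 1
          unfold tAf
          by_cases h1 : i < (vsc m col k).length
          · rw [if_pos h1, if_pos (show i < (vsc m col (k+1)).length by omega), hvs,
              getD_append_left _ _ _ h1]
          · rw [if_neg h1, if_neg (show ¬ i < (vsc m col (k+1)).length by omega)]
            by_cases h2 : i < k
            · rw [if_pos h2, if_pos (show i < k + 1 by omega)]
            · rw [if_neg h2, if_neg (show ¬ i < k + 1 by omega)]
      · -- value moves up to row (vsc m col k).length and row k is zeroed
        have hLlt : (vsc m col k).length < k := by omega
        have hg : (k ≠ (vsc m col k).length ∧ k ≠ 0) := ⟨by omega, by omega⟩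
        rw [hgetL, List.set_set, if_pos hg, set_mapIdx, getD_mapIdx _ _ _ hk,
          if_neg (show ¬ k = (vsc m col k).length by omega), List.set_set, set_mapIdx,
          Prod.mk.injEq]
        refine ⟨?_, hlen1.symm⟩
        apply mapIdx_congr'
        intro i hi
        by_cases hik : i = k
        · have ht : tAf m col (k+1) i = 0 := by
            unfold tAf
            rw [if_neg (show ¬ i < (vsc m col (k+1)).length by omega),
              if_pos (show i < k + 1 by omega)]
          rw [if_pos hik, ht]
          simp only [hik]
        · rw [if_neg hik]
          by_cases hiL : i = (vsc m col k).length
          · subst hiL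
            rw [if_pos rfl, htL]
          · rw [if_neg hiL]
            congr 1
            unfold tAf
            by_cases h1 : i < (vsc m col k).length
            · rw [if_pos h1, if_pos (show i < (vsc m col (k+1)).length by omega), hvs,
                getD_append_left _ _ _ h1]
            · rw [if_neg h1, if_neg (show ¬ i < (vsc m col (k+1)).length by omega)]
              by_cases h2 : i < k
              · rw [if_pos h2, if_pos (show i < k + 1 by omega)]
              · rw [if_neg h2, if_neg (show ¬ i < k + 1 by omega)]
    · rw [if_neg hv]
      have hv0 : colv m col k = 0 := by omega
      have hvs : vsc m col (k+1) = vsc m col k := by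
        rw [vsc_succ, if_neg hv]
        simp
      rw [Prod.mk.injEq]
      refine ⟨?_, by rw [hvs]⟩
      apply mapIdx_congr'
      intro i hi
      congr 1
      unfold tAf
      rw [hvs]
      by_cases h1 : i < (vsc m col k).length
      · simp only [if_pos h1]
      · simp only [if_neg h1]
        by_cases h2 : i < k
        · rw [if_pos h2, if_pos (show i < k + 1 by omega)]
        · by_cases h3 : i = k
          · rw [if_neg h2, if_pos (show i < k + 1 by omega), h3]
            exact hv0
          · rw [if_neg h2, if_neg (show ¬ i < k + 1 by omega)]

-- B's inner loop over rows 0..k-1: the first k rows of the column are rewritten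
theorem innerB (m : List (List Int)) (col : Nat) (vals : List Int) :
    ∀ k, k ≤ m.length →
      (List.range k).foldl (smushBInner col vals) m
        = m.mapIdx (fun i row =>
            if i < k then row.set col (if i < vals.length then vals.getD i 0 else 0) else row) := by
  intro k
  induction k with
  | zero =>
    intro _
    apply List.ext_getElem (by simp)
    intro i h1 h2
    simp
  | succ k ih =>
    intro hk1
    have hk : k < m.length := by omega
    rw [List.range_succ, List.foldl_append, ih (by omega)]
    simp only [List.foldl_cons, List.foldl_nil, smushBInner]
    rw [getD_mapIdx _ _ _ hk, if_neg (show ¬ k < k by omega), set_mapIdx]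
    apply mapIdx_congr'
    intro i hi
    by_cases hik : i = k
    · rw [if_pos hik, if_pos (show i < k + 1 by omega)]
      simp only [hik]
    · rw [if_neg hik]
      by_cases h1 : i < k
      · rw [if_pos h1, if_pos (show i < k + 1 by omega)]
      · rw [if_neg h1, if_neg (show ¬ i < k + 1 by omega)]

theorem filterMap_if {α : Type} (f : α → Int) (l : List α) :
    l.filterMap (fun a => if f a ≠ 0 then some (f a) else none)
      = (l.map f).filter (fun v => v ≠ 0) := by
  induction l with
  | nil => rfl
  | cons r t ihm =>
    simp only [ne_eq, ite_not] at ihm ⊢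
    by_cases h : f r = 0 <;> simp [h, ihm]

-- B's gathered non-zeros are exactly vsc over the whole column
theorem vals_eq (m : List (List Int)) (col : Nat) :
    m.filterMap (fun row => if row.getD col 0 ≠ 0 then some (row.getD col 0) else none)
      = vsc m col m.length := by
  have h1 : (List.range m.length).map (colv m col) = m.map (fun row => row.getD col 0) := by
    apply List.ext_getElem (by simp)
    intro i h1 h2
    simp only [List.getElem_map, List.getElem_range]
    unfold colv
    congr 1
    exact List.getD_eq_getElem _ _ (by simpa using h2)
  unfold vsc
  rw [h1, filterMap_if (fun row => row.getD col 0) m]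

-- per column, A's pass and B's pass produce the same list
theorem colstep (m : List (List Int)) (col : Nat) (hc : ∀ row ∈ m, col < row.length) :
    ((List.range m.length).foldl (smushAInner col) (m, 0)).1
      = (List.range m.length).foldl
          (smushBInner col (m.filterMap (fun row => if row.getD col 0 ≠ 0 then some (row.getD col 0) else none))) m := by
  rw [innerA m col hc m.length le_rfl, innerB m col _ m.length le_rfl, vals_eq]
  apply mapIdx_congr'
  intro i hi
  rw [if_pos hi]
  congr 1
  unfold tAf
  by_cases h1 : i < (vsc m col m.length).length
  · rw [if_pos h1, if_pos h1]
  · rw [if_neg h1, if_neg h1, if_pos hi]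

-- B's pass preserves the shape of the list (row count and row lengths)
theorem colstep_shape (m : List (List Int)) (col : Nat) (vals : List Int) (row' : List Int)
    (h : row' ∈ (List.range m.length).foldl (smushBInner col vals) m) :
    ∃ row ∈ m, row'.length = row.length := by
  rw [innerB m col vals m.length le_rfl] at h
  rcases List.mem_iff_getElem.mp h with ⟨i, hi, hrow⟩
  have hi' : i < m.length := by simpa using hi
  refine ⟨m[i], List.getElem_mem hi', ?_⟩
  rw [← hrow]
  simp only [List.getElem_mapIdx]
  split <;> simp

-- both outer folds agree column by column
theorem outer (cols : List Nat) :
    ∀ m : List (List Int), (∀ row ∈ m, ∀ c ∈ cols, c < row.length) →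
      cols.foldl (fun m col => ((List.range m.length).foldl (smushAInner col) (m, 0)).1) m
        = cols.foldl (fun m col =>
            let vals := m.filterMap (fun row => if row.getD col 0 ≠ 0 then some (row.getD col 0) else none)
            (List.range m.length).foldl (smushBInner col vals) m) m := by
  induction cols with
  | nil => intro m _; rfl
  | cons c cols ih =>
    intro m hm
    simp only [List.foldl_cons]
    rw [colstep m c (fun row hr => hm row hr c (by simp))]
    apply ih
    intro row hr c' hc'
    rcases colstep_shape m c _ row hr with ⟨row0, hrow0, hlen⟩
    rw [hlen]
    exact hm row0 hrow0 c' (by simp [hc'])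

-- ===== VERDICT (by name: the statement is the Claim_ definition above) =====
theorem smushL_spec : Claim_equal_smushL := by
  intro m _ hpre
  unfold Spec_smushL smushL smushL_alt
  refine outer (List.range (m.headD []).length) m ?_
  intro row hr c hc
  exact lt_of_lt_of_le (List.mem_range.mp hc) (hpre.2 row hr)
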